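-- pv_equiv track=rewrite | github.com/colabLearn/colabLearn.github.io | FitClusteringApp_2.3.py | returnCluster
-- ===== SOURCE A (Python) =====
-- def returnCluster(in_rik_dict, in_R_i_Ideal):
--     k_Dict={ }
--
--     clusterList = []
--     clusterList.append(in_R_i_Ideal[0])
--     for key, value in in_rik_dict[in_R_i_Ideal[0]].items():
--         if(key!=in_R_i_Ideal[0]):
--             k_Dict[key]=value
--
--     k_val_List=k_Dict.values()
--
--     maxRel = max(k_val_List)
--
--     for key, value in k_Dict.items():
--         if(value==maxRel):
--             clusterList.append(key)
--
--     return clusterList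
-- ===== SOURCE B (Python) =====
-- def returnCluster(in_rik_dict, in_R_i_Ideal):
--     ideal = in_R_i_Ideal[0]
--     best = None
--     best_keys = []
--     for key, value in in_rik_dict[ideal].items():
--         if key == ideal:
--             continue
--         if best is None or value > best:
--             best = value
--             best_keys = [key]
--         elif value == best:
--             best_keys.append(key)
--     return [ideal] + best_keys
-- ===== Notes on version B (the rewrite author's own statement) =====
-- stated objective: simpler
-- what changed: one pass with a running maximum and the list of keys attaining it replaces A's three phases (build an auxiliary dict, max() over its values, second scan collecting argmax keys)
-- crash fix: when the selected inner dict has no key other than the ideal key, A raises ValueError (max of an empty sequence) while B returns just [in_R_i_Ideal[0]]. — e.g. on returnCluster([("x", [("x", 1)])], ["x"]): A raises ValueError, B returns ["x"]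
import Mathlib
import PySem

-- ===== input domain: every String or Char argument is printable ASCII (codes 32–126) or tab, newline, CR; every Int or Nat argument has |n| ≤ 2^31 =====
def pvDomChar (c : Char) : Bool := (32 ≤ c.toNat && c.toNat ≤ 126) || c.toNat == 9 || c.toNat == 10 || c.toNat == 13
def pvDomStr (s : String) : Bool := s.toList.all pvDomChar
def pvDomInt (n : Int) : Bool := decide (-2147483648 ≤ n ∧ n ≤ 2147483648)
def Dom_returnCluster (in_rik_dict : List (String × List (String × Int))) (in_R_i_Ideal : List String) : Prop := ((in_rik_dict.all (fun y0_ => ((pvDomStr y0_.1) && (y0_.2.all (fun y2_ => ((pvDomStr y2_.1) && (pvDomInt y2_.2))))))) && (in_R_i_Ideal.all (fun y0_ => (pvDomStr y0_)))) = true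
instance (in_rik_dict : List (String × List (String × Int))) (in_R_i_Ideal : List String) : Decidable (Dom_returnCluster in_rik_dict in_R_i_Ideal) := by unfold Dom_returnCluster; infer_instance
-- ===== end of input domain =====

-- B replaces A's three phases (auxiliary dict, max() over its values, second collecting scan)
-- by one pass keeping a running maximum and the list of keys attaining it; equal return values on Pre_.

-- ===== PORT A =====
def returnCluster (in_rik_dict : List (String × List (String × Int))) (in_R_i_Ideal : List String) : List String :=
  match PySem.List.pyGet? in_R_i_Ideal 0 with
  | none => []                                   -- IndexError, excluded by Pre_
  | some h =>
    match (PySem.Dict.mk in_rik_dict).get? h with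
    | none => []                                 -- KeyError, excluded by Pre_
    | some items =>
      -- first loop: k_Dict[key] = value for key != ideal
      let kD := items.foldl (fun kD p => if p.1 ≠ h then kD.insert p.1 p.2 else kD) PySem.Dict.empty
      -- maxRel = max(k_Dict.values())
      match PySem.List.max? kD.values (fun v => v) with
      | none => []                               -- ValueError from max([]), excluded by Pre_
      | some m =>
        -- second loop: append keys whose value equals maxRel, onto clusterList = [ideal]
        kD.items.foldl (fun cl p => if p.2 = m then cl ++ [p.1] else cl) [h]

-- ===== PORT B =====
-- the body of Source B's loop after the 'continue': update (best, best_keys)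
def returnClusterUpd (st : Option Int × List String) (p : String × Int) : Option Int × List String :=
  match st.1 with
  | none => (some p.2, [p.1])
  | some b => if b < p.2 then (some p.2, [p.1])
              else if p.2 = b then (some b, st.2 ++ [p.1])
              else st

def returnClusterStep (h : String) (st : Option Int × List String) (p : String × Int) : Option Int × List String :=
  if p.1 = h then st else returnClusterUpd st p

def returnCluster_alt (in_rik_dict : List (String × List (String × Int))) (in_R_i_Ideal : List String) : List String :=
  match PySem.List.pyGet? in_R_i_Ideal 0 with
  | none => []                                   -- IndexError, as in Source B
  | some h =>
    match (PySem.Dict.mk in_rik_dict).get? h with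
    | none => []                                 -- KeyError, as in Source B
    | some items =>
      let st := items.foldl (returnClusterStep h) (none, [])
      h :: st.2

-- ===== PRECONDITION & SPEC =====
-- Pre_ excludes: (a) inputs where A raises (empty in_R_i_Ideal → IndexError; ideal key absent → KeyError;
-- no inner key different from the ideal key → ValueError from max([])), and (b) association lists with
-- duplicate keys (outer or in the selected inner list), which cannot arise from the Python dicts these
-- lists represent — a Python dict's keys are necessarily distinct.
def Pre_returnCluster (in_rik_dict : List (String × List (String × Int))) (in_R_i_Ideal : List String) : Prop :=
  in_R_i_Ideal ≠ [] ∧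
  ((PySem.Dict.mk in_rik_dict).get? in_R_i_Ideal.headI).isSome = true ∧
  (in_rik_dict.map (·.1)).Nodup ∧
  ((((PySem.Dict.mk in_rik_dict).get? in_R_i_Ideal.headI).getD []).map (·.1)).Nodup ∧
  (((PySem.Dict.mk in_rik_dict).get? in_R_i_Ideal.headI).getD []).any (fun p => p.1 ≠ in_R_i_Ideal.headI) = true
instance (in_rik_dict : List (String × List (String × Int))) (in_R_i_Ideal : List String) : Decidable (Pre_returnCluster in_rik_dict in_R_i_Ideal) := by unfold Pre_returnCluster; infer_instance

def pvWitness_returnCluster : (List (String × List (String × Int))) × List String :=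
  ([("x", [("x", 1), ("y", 2), ("z", 2)])], ["x"])

-- when the selected inner dict has no key other than the ideal key, A raises ValueError (max of an
-- empty sequence) while B returns just [in_R_i_Ideal[0]].
def Raises_returnCluster (in_rik_dict : List (String × List (String × Int))) (in_R_i_Ideal : List String) : Prop :=
  in_R_i_Ideal ≠ [] ∧
  ((PySem.Dict.mk in_rik_dict).get? in_R_i_Ideal.headI).isSome = true ∧
  (((PySem.Dict.mk in_rik_dict).get? in_R_i_Ideal.headI).getD []).all (fun p => p.1 = in_R_i_Ideal.headI) = true
instance (in_rik_dict : List (String × List (String × Int))) (in_R_i_Ideal : List String) : Decidable (Raises_returnCluster in_rik_dict in_R_i_Ideal) := by unfold Raises_returnCluster; infer_instance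

def pvRaiseWitness_returnCluster : (List (String × List (String × Int))) × List String :=
  ([("x", [("x", 1)])], ["x"])
def pvRaiseWitnessOut_returnCluster : List String := ["x"]

def Spec_returnCluster (in_rik_dict : List (String × List (String × Int))) (in_R_i_Ideal : List String) (out : List String) : Prop := out = returnCluster_alt in_rik_dict in_R_i_Ideal
instance (in_rik_dict : List (String × List (String × Int))) (in_R_i_Ideal : List String) (out : List String) : Decidable (Spec_returnCluster in_rik_dict in_R_i_Ideal out) := by unfold Spec_returnCluster; infer_instance

-- ===== CLAIM (what is proved, stated in full; the proofs are below) =====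
def Claim_equal_returnCluster : Prop := ∀ (in_rik_dict : List (String × List (String × Int))) (in_R_i_Ideal : List String), Dom_returnCluster in_rik_dict in_R_i_Ideal → Pre_returnCluster in_rik_dict in_R_i_Ideal → Spec_returnCluster in_rik_dict in_R_i_Ideal (returnCluster in_rik_dict in_R_i_Ideal)

def Claim_raises_returnCluster : Prop := (∀ (in_rik_dict : List (String × List (String × Int))) (in_R_i_Ideal : List String), Dom_returnCluster in_rik_dict in_R_i_Ideal → Raises_returnCluster in_rik_dict in_R_i_Ideal → ¬ Pre_returnCluster in_rik_dict in_R_i_Ideal) ∧ (Dom_returnCluster (pvRaiseWitness_returnCluster.1) (pvRaiseWitness_returnCluster.2) ∧ Raises_returnCluster (pvRaiseWitness_returnCluster.1) (pvRaiseWitness_returnCluster.2) ∧ returnCluster_alt (pvRaiseWitness_returnCluster.1) (pvRaiseWitness_returnCluster.2) = pvRaiseWitnessOut_returnCluster)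

-- ===== LEMMAS AND PROOFS =====

-- running maximum of the candidate values, as Source B maintains it
def pvRunMax (l : List (String × Int)) (b : Int) : Int := l.foldl (fun m p => max m p.2) b

lemma pvRunMax_cons (k : String) (v : Int) (t : List (String × Int)) (b : Int) :
    pvRunMax ((k, v) :: t) b = pvRunMax t (max b v) := rfl

lemma pvRunMax_le (t : List (String × Int)) (b : Int) : b ≤ pvRunMax t b := by
  unfold pvRunMax
  exact (PySem.List.le_foldl_max_int t (·.2) b).1

lemma pvFoldl_skip {α β : Type} (q : α → Prop) [DecidablePred q] (f : β → α → β) :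
    ∀ (l : List α) (init : β),
      l.foldl (fun acc x => if q x then acc else f acc x) init
        = (l.filter (fun x => decide (¬ q x))).foldl f init := by
  intro l
  induction l with
  | nil => intro init; rfl
  | cons x t ih =>
    intro init
    by_cases hx : q x <;> simp [hx, ih]

lemma pvLoopB (l : List (String × Int)) : ∀ (b : Int) (acc : List String),
    l.foldl returnClusterUpd (some b, acc)
      = (some (pvRunMax l b),
         (if b = pvRunMax l b then acc else [])
           ++ (l.filter (fun p => decide (p.2 = pvRunMax l b))).map (·.1)) := by
  induction l with
  | nil => intro b acc; simp [pvRunMax]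
  | cons p t ih =>
    obtain ⟨k, v⟩ := p
    intro b acc
    have hupd : returnClusterUpd (some b, acc) (k, v)
        = if b < v then (some v, [k]) else if v = b then (some b, acc ++ [k]) else (some b, acc) := rfl
    rcases lt_trichotomy b v with hlt | heq | hgt
    · rw [List.foldl_cons, hupd, if_pos hlt, ih v [k], pvRunMax_cons, max_eq_right hlt.le]
      have hbne : ¬ b = pvRunMax t v := by have := pvRunMax_le t v; omega
      rw [if_neg hbne, List.filter_cons]
      simp only [decide_eq_true_eq]
      rcases eq_or_ne v (pvRunMax t v) with hv | hv
      · rw [if_pos hv, if_pos (show ((k, v) : String × Int).2 = pvRunMax t v from hv)]; simp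
      · rw [if_neg hv, if_neg (show ¬ ((k, v) : String × Int).2 = pvRunMax t v from hv)]
    · rw [List.foldl_cons, hupd, if_neg (by omega : ¬ b < v), if_pos heq.symm,
          ih b (acc ++ [k]), pvRunMax_cons, max_eq_left (le_of_eq heq.symm)]
      rw [List.filter_cons]
      simp only [decide_eq_true_eq]
      rcases eq_or_ne b (pvRunMax t b) with hb | hb
      · rw [if_pos hb, if_pos hb, if_pos (show ((k, v) : String × Int).2 = pvRunMax t b from heq.symm.trans hb)]
        simp
      · rw [if_neg hb, if_neg hb, if_neg (show ¬ ((k, v) : String × Int).2 = pvRunMax t b from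
            fun hvv => hb (heq.trans hvv))]
    · rw [List.foldl_cons, hupd, if_neg (by omega : ¬ b < v), if_neg (by omega : ¬ v = b),
          ih b acc, pvRunMax_cons, max_eq_left hgt.le]
      have hv : ¬ v = pvRunMax t b := by have := pvRunMax_le t b; omega
      rw [List.filter_cons]
      simp only [decide_eq_true_eq]
      rw [if_neg (show ¬ ((k, v) : String × Int).2 = pvRunMax t b from hv)]

-- ===== VERDICT (by name: the statement is the Claim_ definition above) =====
theorem returnCluster_spec : Claim_equal_returnCluster := by
  intro d ideal _ hpre
  obtain ⟨hne, hsome, _hnodOuter, hnodInner, hany⟩ := hpre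
  unfold Spec_returnCluster
  obtain ⟨h, rest, rfl⟩ : ∃ h rest, ideal = h :: rest := by
    cases ideal with
    | nil => exact absurd rfl hne
    | cons h rest => exact ⟨h, rest, rfl⟩
  obtain ⟨items, hget⟩ : ∃ items, (PySem.Dict.mk d).get? h = some items := by
    cases hd : (PySem.Dict.mk d).get? h with
    | none => rw [List.headI, hd] at hsome; simp at hsome
    | some items => exact ⟨items, rfl⟩
  rw [List.headI, hget] at hnodInner hany
  simp only [Option.getD_some] at hnodInner hany
  -- the candidate list (keys different from the ideal key), shared by both sides
  set l : List (String × Int) := items.filter (fun p => decide (¬ p.1 = h)) with hl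
  have hA_fold :
      items.foldl (fun kD p => if p.1 ≠ h then kD.insert p.1 p.2 else kD) PySem.Dict.empty
        = l.foldl (fun kD p => kD.insert p.1 p.2) PySem.Dict.empty := by
    rw [PySem.List.foldl_ite_eq_foldl_filter (p := fun p : String × Int => p.1 ≠ h)]
  have hB_fold :
      items.foldl (returnClusterStep h) ((none : Option Int), ([] : List String))
        = l.foldl returnClusterUpd (none, []) := by
    unfold returnClusterStep
    rw [pvFoldl_skip (q := fun p : String × Int => p.1 = h)]
  have hlsub : l.Sublist items := List.filter_sublist
  have hlnodup : (l.map (·.1)).Nodup := hnodInner.sublist (hlsub.map (·.1))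
  have hkd' : (l.foldl (fun kD p => kD.insert p.1 p.2) PySem.Dict.empty).items = l := by
    rw [PySem.Dict.items_foldl_insert_fresh (k := (·.1)) (v := (·.2)) (d := PySem.Dict.empty)
          (l := l) (fun a _ => PySem.Dict.contains_empty a.1) hlnodup]
    simp [PySem.Dict.empty]
  obtain ⟨p, t, hlpt⟩ : ∃ p t, l = p :: t := by
    rw [List.any_eq_true] at hany
    obtain ⟨p, hpmem, hpne⟩ := hany
    have hpl : p ∈ l := by
      rw [hl, List.mem_filter]; exact ⟨hpmem, by simpa using hpne⟩
    cases hc : l with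
    | nil => rw [hc] at hpl; cases hpl
    | cons p t => exact ⟨p, t, rfl⟩
  have hvals :
      (l.foldl (fun kD p => kD.insert p.1 p.2) PySem.Dict.empty).values = l.map (·.2) := by
    show (l.foldl (fun kD p => kD.insert p.1 p.2) PySem.Dict.empty).items.map (·.2) = l.map (·.2)
    rw [hkd']
  have hmax :
      PySem.List.max? (l.map (·.2)) (fun v => v) = some (pvRunMax t p.2) := by
    rw [hlpt, List.map_cons, PySem.List.max?_id_cons, List.foldl_map]
    rfl
  -- evaluate both ports
  show returnCluster d (h :: rest) = returnCluster_alt d (h :: rest)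
  simp only [returnCluster, returnCluster_alt, PySem.List.pyGet?_zero_cons, hget,
             hA_fold, hB_fold, hvals, hmax, hkd']
  rw [hlpt]
  have hfirst : returnClusterUpd ((none : Option Int), ([] : List String)) p = (some p.2, [p.1]) := rfl
  conv_rhs => rw [List.foldl_cons, hfirst, pvLoopB t p.2 [p.1]]
  rw [PySem.List.foldl_append_ite (p := fun q : String × Int => q.2 = pvRunMax t p.2) (f := (·.1)),
      List.filter_cons]
  simp only [decide_eq_true_eq]
  rcases eq_or_ne p.2 (pvRunMax t p.2) with hp | hp
  · rw [if_pos hp, if_pos hp]; simp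
  · rw [if_neg hp, if_neg hp]; simp

def returnCluster_raises : Claim_raises_returnCluster := by
  unfold Claim_raises_returnCluster
  constructor
  · intro d ideal _ hr hpre
    obtain ⟨_, _, hall⟩ := hr
    obtain ⟨_, _, _, _, hany⟩ := hpre
    rw [List.any_eq_true] at hany
    obtain ⟨p, hpmem, hpne⟩ := hany
    rw [List.all_eq_true] at hall
    have hp := hall p hpmem
    simp at hp hpne
    exact hpne hp
  · exact ⟨by decide, by decide, by decide⟩
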